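-- pv_equiv track=rewrite | github.com/cipherflow-fhe/lattisense | frontend/custom_task.py | get_glk_col
-- ===== SOURCE A (Python) =====
-- def get_glk_col(steps: int, poly_degree: int):
--     def convert2naf(x: int):
--         xh = x >> 1
--         x3 = x + xh
--         c = xh ^ x3
--         n_pos = x3 & c
--         n_minus = xh & c
--         return bin(n_pos)[2:], bin(n_minus)[2:]
--
--     r_pos, r_neg = convert2naf(steps)
--
--     mask = (poly_degree >> 1) - 1
--     glk_col_pos_idx = []
--     for idx, digit in enumerate(r_pos):
--         if int(digit) == 0:
--             continue
--
--         step_idx = len(r_pos) - idx - 1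
--         step = 2**step_idx & mask
--         if step == 0:
--             continue
--
--         glk_col_pos_idx.append(step_idx)
--
--     glk_col_neg_idx = []
--     for idx, digit in enumerate(r_neg):
--         if int(digit) == 0:
--             continue
--
--         step_idx = len(r_neg) - idx - 1
--         step = (poly_degree >> 1) - (2**step_idx & mask)
--
--         glk_col_neg_idx.append(step_idx)
--
--     return glk_col_pos_idx, glk_col_neg_idx
-- ===== SOURCE B (Python) =====
-- def get_glk_col(steps: int, poly_degree: int):
--     # Digit-serial signed-binary (NAF) recoding: peel one signed digit per
--     # iteration (d = 2 - x%4 for odd x), instead of A's parallel bit-trick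
--     # masks and bin()-string walk.
--     pos, neg = [], []
--     x, i = steps, 0
--     while x != 0:
--         if x % 2:
--             d = 2 - (x % 4)
--             (pos if d == 1 else neg).append(i)
--             x -= d
--         x >>= 1
--         i += 1
--     mask = (poly_degree >> 1) - 1
--     return [j for j in reversed(pos) if (mask >> j) & 1], [j for j in reversed(neg)]
-- ===== Notes on version B (the rewrite author's own statement) =====
-- stated objective: alternative
-- what changed: Replaces A's parallel NAF bit-trick (xh/x3/xor/and masks) plus bin()-string walk with a digit-serial signed-binary recoding loop that peels one NAF digit per iteration (d = 2 - x%4; x -= d; x >>= 1), collecting positions ascending and reversing at the end.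
import Mathlib
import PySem

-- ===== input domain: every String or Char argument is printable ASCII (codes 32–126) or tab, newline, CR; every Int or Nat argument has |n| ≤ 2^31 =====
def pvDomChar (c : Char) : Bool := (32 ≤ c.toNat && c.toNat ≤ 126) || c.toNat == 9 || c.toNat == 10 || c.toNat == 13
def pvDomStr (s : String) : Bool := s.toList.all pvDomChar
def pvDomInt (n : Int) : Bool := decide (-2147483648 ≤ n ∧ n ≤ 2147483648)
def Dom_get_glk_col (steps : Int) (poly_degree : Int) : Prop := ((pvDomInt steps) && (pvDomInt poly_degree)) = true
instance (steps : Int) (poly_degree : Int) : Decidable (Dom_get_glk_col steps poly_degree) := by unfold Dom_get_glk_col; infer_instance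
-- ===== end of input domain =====

-- B replaces A's parallel NAF bit-trick masks and bin()-string walk with a
-- digit-serial signed-binary recoding loop (d = 2 - x%4; x -= d; x >>= 1);
-- objective: alternative algorithm, same return value.

-- ===== PORT A =====
-- binary digits of n (MSB first), accumulator style: helper for Python's bin(x)[2:]
def pyBinAux (n : Nat) (acc : List Char) : List Char :=
  if h : n = 0 then acc
  else pyBinAux (n / 2) ((if n % 2 = 1 then '1' else '0') :: acc)
  termination_by n
  decreasing_by exact Nat.div_lt_self (Nat.pos_of_ne_zero h) (by decide)

-- bin(x)[2:] as a list of chars; exact for x ≥ 0, the only values reached here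
-- (n_pos and n_minus are always nonnegative, proved below)
def pyBinList (x : Int) : List Char := if x ≤ 0 then ['0'] else pyBinAux x.toNat []

-- 'for idx, digit in enumerate(r_pos)': recursion over the chars with an explicit idx counter
def posLoop (L msk : Int) : List Char → Int → List Int → List Int
  | [], _, acc => acc
  | d :: rest, idx, acc =>
    if d = '0' then posLoop L msk rest (idx + 1) acc  -- 'if int(digit) == 0: continue' (digits are '0'/'1')
    else
      let step_idx := L - idx - 1
      let step := PySem.Int.band ((2 : Int) ^ step_idx.toNat) msk  -- 2**step_idx & mask (step_idx ≥ 0 here)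
      if step = 0 then posLoop L msk rest (idx + 1) acc
      else posLoop L msk rest (idx + 1) (acc ++ [step_idx])

def negLoop (L half msk : Int) : List Char → Int → List Int → List Int
  | [], _, acc => acc
  | d :: rest, idx, acc =>
    if d = '0' then negLoop L half msk rest (idx + 1) acc
    else
      let step_idx := L - idx - 1
      let _step := half - PySem.Int.band ((2 : Int) ^ step_idx.toNat) msk  -- computed but unused, as in Python
      negLoop L half msk rest (idx + 1) (acc ++ [step_idx])

def get_glk_col (steps : Int) (poly_degree : Int) : List Int × List Int :=
  let xh := steps >>> (1 : Nat)
  let x3 := steps + xh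
  let c := PySem.Int.bxor xh x3
  let n_pos := PySem.Int.band x3 c
  let n_minus := PySem.Int.band xh c
  let r_pos := pyBinList n_pos
  let r_neg := pyBinList n_minus
  let mask := (poly_degree >>> (1 : Nat)) - 1
  (posLoop ((r_pos.length : Int)) mask r_pos 0 [],
   negLoop ((r_neg.length : Int)) (poly_degree >>> (1 : Nat)) mask r_neg 0 [])

-- ===== PORT B =====
-- 'while x != 0: if x % 2: d = 2 - x%4; append i; x -= d; x >>= 1; i += 1'
-- (fuel makes the loop structural; |steps| + 1 bounds the iteration count since
-- |x| strictly decreases each pass — proved in nafLoop_eq below)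
def nafLoop : Nat → Int → Int → List Int → List Int → List Int × List Int
  | 0, _, _, pos, neg => (pos, neg)
  | fuel + 1, x, i, pos, neg =>
    if x = 0 then (pos, neg)
    else if PySem.Int.mod x 2 ≠ 0 then
      let d := 2 - PySem.Int.mod x 4
      if d = 1 then nafLoop fuel ((x - d) >>> (1 : Nat)) (i + 1) (pos ++ [i]) neg
      else nafLoop fuel ((x - d) >>> (1 : Nat)) (i + 1) pos (neg ++ [i])
    else nafLoop fuel (x >>> (1 : Nat)) (i + 1) pos neg

def get_glk_col_alt (steps : Int) (poly_degree : Int) : List Int × List Int :=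
  let pn := nafLoop (steps.natAbs + 1) steps 0 [] []
  let mask := (poly_degree >>> (1 : Nat)) - 1
  (pn.1.reverse.filter (fun j => decide (PySem.Int.band (mask >>> j.toNat) 1 ≠ 0)),
   pn.2.reverse)

-- ===== PRECONDITION & SPEC =====
def Spec_get_glk_col (steps : Int) (poly_degree : Int) (out : List Int × List Int) : Prop := out = get_glk_col_alt steps poly_degree
instance (steps : Int) (poly_degree : Int) (out : List Int × List Int) : Decidable (Spec_get_glk_col steps poly_degree out) := by unfold Spec_get_glk_col; infer_instance

-- ===== CLAIM (what is proved, stated in full; the proofs are below) =====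
def Claim_equal_get_glk_col : Prop := ∀ (steps : Int) (poly_degree : Int), Dom_get_glk_col steps poly_degree → Spec_get_glk_col steps poly_degree (get_glk_col steps poly_degree)

-- ===== LEMMAS AND PROOFS =====

-- ---------- A-side: A's outputs as filters over the bits of n_pos / n_minus ----------

-- char written for bit j of m by pyBinAux
def cOf (m j : Nat) : Char := if m.testBit j then '1' else '0'

lemma cOf_succ (m j : Nat) : cOf m (j + 1) = cOf (m / 2) j := by
  simp [cOf, Nat.testBit_add_one]

lemma testBit_via_mod (k j : Nat) : k.testBit j = decide ((k >>> j) % 2 = 1) := by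
  have h := Nat.testBit_shiftRight (i := j) (j := 0) k
  rw [Nat.testBit_zero, Nat.add_zero] at h
  exact h.symm

lemma pyBinAux_eq (m : Nat) (acc : List Char) :
    pyBinAux m acc = ((List.range (PySem.Int.bitLength (m : Int))).reverse.map (cOf m)) ++ acc := by
  induction m using Nat.strong_induction_on generalizing acc with
  | _ m ih =>
    by_cases h : m = 0
    · subst h
      simp [pyBinAux, PySem.Int.bitLength_zero]
    · rw [pyBinAux]
      simp only [h, dite_false]
      rw [ih (m / 2) (Nat.div_lt_self (Nat.pos_of_ne_zero h) (by decide))]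
      rw [PySem.Int.bitLength_natCast (Nat.pos_of_ne_zero h)]
      rw [List.range_succ_eq_map]
      simp only [List.reverse_cons, List.map_append, List.map_reverse, List.map_map,
        List.append_assoc, List.singleton_append, List.map_cons, List.map_nil]
      congr 1
      · simp only [← List.map_reverse]
        apply List.map_congr_left
        intro j _
        simpa [Function.comp, Nat.succ_eq_add_one] using (cOf_succ m j).symm
      · simp [cOf, Nat.testBit_zero]

lemma toNat_neg_negSucc (t : Nat) : (-Int.negSucc t - 1).toNat = t := by
  rw [Int.negSucc_eq]; omega

lemma band_pow_negSucc (j k : Nat) :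
    PySem.Int.band ((2 : Int) ^ j) (Int.negSucc k) = ((2 ^ j - (2 ^ j &&& k) : Nat) : Int) := by
  have ha : (0 : Int) ≤ (2 : Int) ^ j := by positivity
  have hb : ¬ (0 : Int) ≤ Int.negSucc k := not_le.mpr (Int.negSucc_lt_zero k)
  have e1 : ((2 : Int) ^ j).toNat = 2 ^ j := by
    have hcast : ((2 : Int) ^ j) = (((2 ^ j : Nat)) : Int) := by push_cast; ring
    rw [hcast, Int.toNat_natCast]
  unfold PySem.Int.band
  rw [if_pos ha, if_neg hb, e1, toNat_neg_negSucc]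

lemma band_negSucc_one (t : Nat) :
    PySem.Int.band (Int.negSucc t) 1 = ((1 - (1 &&& t) : Nat) : Int) := by
  have ha : ¬ (0 : Int) ≤ Int.negSucc t := not_le.mpr (Int.negSucc_lt_zero t)
  have hb : (0 : Int) ≤ 1 := by omega
  have e4 : (1 : Int).toNat = 1 := rfl
  unfold PySem.Int.band
  rw [if_neg ha, if_pos hb, toNat_neg_negSucc, e4]

-- A's mask test (2**j & mask == 0) agrees with B's ((mask >> j) & 1 == 0), any sign of mask
lemma mask_bit (msk : Int) (j : Nat) :
    (PySem.Int.band ((2 : Int) ^ j) msk = 0) ↔ (PySem.Int.band (msk >>> j) 1 = 0) := by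
  have h7 : 0 < 2 ^ j := Nat.two_pow_pos j
  by_cases hm : 0 ≤ msk
  · obtain ⟨k, rfl⟩ : ∃ k : Nat, msk = (k : Int) := ⟨msk.toNat, (Int.toNat_of_nonneg hm).symm⟩
    have h1 : ((2 : Int) ^ j) = (((2 ^ j : Nat)) : Int) := by push_cast; ring
    have h2 : ((k : Int) >>> j) = ((k >>> j : Nat) : Int) := rfl
    have h3 : (1 : Int) = ((1 : Nat) : Int) := rfl
    rw [h1, h2, h3, PySem.Int.band_natCast, PySem.Int.band_natCast,
      Nat.two_pow_and, Nat.and_one_is_mod]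
    simp only [Int.natCast_eq_zero]
    have hb0 := testBit_via_mod k j
    clear h1 h2 h3 hm
    cases hb : k.testBit j <;> rw [hb] at hb0
    · have h8 : (k >>> j) % 2 = 0 := by
        have h9 := of_decide_eq_false hb0.symm
        omega
      rw [h8]
      simp only [Bool.toNat_false, Nat.mul_zero]
    · have h8 : (k >>> j) % 2 = 1 := of_decide_eq_true hb0.symm
      rw [h8]
      simp only [Bool.toNat_true, Nat.mul_one]
      clear hb0 h8
      omega
  · rw [not_le] at hm
    obtain ⟨k, rfl⟩ : ∃ k : Nat, msk = Int.negSucc k := by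
      refine ⟨(-msk - 1).toNat, ?_⟩
      rw [Int.negSucc_eq, Int.toNat_of_nonneg (by omega)]
      ring
    have hsh : (Int.negSucc k >>> j) = Int.negSucc (k >>> j) := rfl
    rw [band_pow_negSucc, hsh, band_negSucc_one]
    simp only [Int.natCast_eq_zero]
    rw [Nat.two_pow_and k j]
    have h1m : 1 &&& (k >>> j) = (k >>> j) % 2 := by
      rw [Nat.and_comm, Nat.and_one_is_mod]
    rw [h1m]
    have hb0 := testBit_via_mod k j
    clear hm hsh h1m
    cases hb : k.testBit j <;> rw [hb] at hb0
    · have h8 : (k >>> j) % 2 = 0 := by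
        have h9 := of_decide_eq_false hb0.symm
        omega
      rw [h8]
      simp only [Bool.toNat_false, Nat.mul_zero, Nat.sub_zero]
      clear hb0 h8
      omega
    · have h8 : (k >>> j) % 2 = 1 := of_decide_eq_true hb0.symm
      rw [h8]
      simp only [Bool.toNat_true, Nat.mul_one]
      clear hb0 h8
      simp

lemma cOf_eq_zero (m j : Nat) : (cOf m j = '0') ↔ m.testBit j = false := by
  cases h : m.testBit j <;> simp [cOf, h]

-- A's scan over the digit list = filter over the reversed range (positive side)
lemma posLoop_go (msk : Int) (m K : Nat) (L idx : Int) (acc : List Int)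
    (h : idx + K = L) :
    posLoop L msk ((List.range K).reverse.map (cOf m)) idx acc
    = acc ++ (((List.range K).reverse.filter
        (fun (i : Nat) => m.testBit i &&
                  decide (PySem.Int.band (msk >>> i) 1 ≠ 0))).map (fun (i : Nat) => (i : Int))) := by
  induction K generalizing idx acc with
  | zero => simp [posLoop]
  | succ K ih =>
    rw [List.range_succ, List.reverse_append]
    simp only [List.reverse_cons, List.reverse_nil, List.nil_append, List.singleton_append,
      List.map_cons, List.filter_cons]
    have hs : L - idx - 1 = (K : Int) := by push_cast at h ⊢; omega
    have hh : (idx + 1) + (K : Int) = L := by push_cast at h ⊢; omega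
    cases hb : m.testBit K
    case true =>
      have hc : ¬ (cOf m K = '0') := by simp [cOf_eq_zero, hb]
      by_cases hmz : PySem.Int.band ((2 : Int) ^ K) msk = 0
      · have hmb : (decide (PySem.Int.band (msk >>> K) 1 ≠ 0)) = false := by
          simp [(mask_bit msk K).mp hmz]
        rw [posLoop]
        simp only [hc, if_false, hs, Int.toNat_natCast, hmz, if_true,
          hb, hmb, Bool.true_and, Bool.false_eq_true]
        exact ih idx.succ acc hh
      · have hmb : (decide (PySem.Int.band (msk >>> K) 1 ≠ 0)) = true := by
          simp only [decide_eq_true_eq]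
          exact fun hz => hmz ((mask_bit msk K).mpr hz)
        rw [posLoop]
        simp only [hc, if_false, hs, Int.toNat_natCast, hmz, if_true,
          hb, hmb, Bool.true_and, if_false]
        rw [ih (idx + 1) (acc ++ [(K : Int)]) hh]
        simp [List.append_assoc]
    case false =>
      have hc : cOf m K = '0' := (cOf_eq_zero m K).mpr hb
      rw [posLoop]
      simp only [hc, if_true, hb, Bool.false_and, Bool.false_eq_true, if_false]
      exact ih (idx + 1) acc hh

-- same for the negative side (no mask filter)
lemma negLoop_go (half msk : Int) (m K : Nat) (L idx : Int) (acc : List Int)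
    (h : idx + K = L) :
    negLoop L half msk ((List.range K).reverse.map (cOf m)) idx acc
    = acc ++ (((List.range K).reverse.filter
        (fun (i : Nat) => m.testBit i)).map (fun (i : Nat) => (i : Int))) := by
  induction K generalizing idx acc with
  | zero => simp [negLoop]
  | succ K ih =>
    rw [List.range_succ, List.reverse_append]
    simp only [List.reverse_cons, List.reverse_nil, List.nil_append, List.singleton_append,
      List.map_cons, List.filter_cons]
    have hs : L - idx - 1 = (K : Int) := by push_cast at h ⊢; omega
    have hh : (idx + 1) + (K : Int) = L := by push_cast at h ⊢; omega
    cases hb : m.testBit K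
    case true =>
      have hc : ¬ (cOf m K = '0') := by simp [cOf_eq_zero, hb]
      rw [negLoop]
      simp only [hc, if_false, hs, hb, if_true]
      rw [ih (idx + 1) (acc ++ [(K : Int)]) hh]
      simp [List.append_assoc]
    case false =>
      have hc : cOf m K = '0' := (cOf_eq_zero m K).mpr hb
      rw [negLoop]
      simp only [hc, if_true, hb, Bool.false_eq_true, if_false]
      exact ih (idx + 1) acc hh

lemma pos_side (msk : Int) (m : Nat) :
    posLoop (((pyBinList (m : Int)).length : Int)) msk (pyBinList (m : Int)) 0 []
    = ((List.range (PySem.Int.bitLength ((m : Int)))).reverse.filter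
        (fun (i : Nat) => m.testBit i &&
                  decide (PySem.Int.band (msk >>> i) 1 ≠ 0))).map (fun (i : Nat) => (i : Int)) := by
  by_cases h : m = 0
  · subst h
    simp [pyBinList, posLoop, PySem.Int.bitLength_zero]
  · have hx : ¬ ((m : Int) ≤ 0) := by
      have hpos : 0 < m := Nat.pos_of_ne_zero h
      omega
    have hlist : pyBinList (m : Int)
        = (List.range (PySem.Int.bitLength (m : Int))).reverse.map (cOf m) := by
      rw [pyBinList]
      simp only [hx, if_false, Int.toNat_natCast]
      simpa using pyBinAux_eq m []
    rw [hlist]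
    have hlen : (((List.range (PySem.Int.bitLength (m : Int))).reverse.map (cOf m)).length)
        = PySem.Int.bitLength (m : Int) := by simp
    rw [hlen]
    exact posLoop_go msk m _ _ 0 [] (by omega)

lemma neg_side (half msk : Int) (m : Nat) :
    negLoop (((pyBinList (m : Int)).length : Int)) half msk (pyBinList (m : Int)) 0 []
    = ((List.range (PySem.Int.bitLength ((m : Int)))).reverse.filter
        (fun (i : Nat) => m.testBit i)).map (fun (i : Nat) => (i : Int)) := by
  by_cases h : m = 0
  · subst h
    simp [pyBinList, negLoop, PySem.Int.bitLength_zero]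
  · have hx : ¬ ((m : Int) ≤ 0) := by
      have hpos : 0 < m := Nat.pos_of_ne_zero h
      omega
    have hlist : pyBinList (m : Int)
        = (List.range (PySem.Int.bitLength (m : Int))).reverse.map (cOf m) := by
      rw [pyBinList]
      simp only [hx, if_false, Int.toNat_natCast]
      simpa using pyBinAux_eq m []
    rw [hlist]
    have hlen : (((List.range (PySem.Int.bitLength (m : Int))).reverse.map (cOf m)).length)
        = PySem.Int.bitLength (m : Int) := by simp
    rw [hlen]
    exact negLoop_go half msk m _ _ 0 [] (by omega)

-- ---------- bit-level toolbox ----------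

def Nonadj (n : Nat) : Prop := ∀ i, ¬(n.testBit i = true ∧ n.testBit (i + 1) = true)

lemma mod_two_of_testBit (n : Nat) : n % 2 = if n.testBit 0 then 1 else 0 := by
  rw [Nat.testBit_zero]
  rcases Nat.mod_two_eq_zero_or_one n with h | h <;> simp [h]

lemma testBit_one_div (n : Nat) : n.testBit 1 = (n / 2).testBit 0 := by
  rw [Nat.testBit_add_one]

lemma tb_zero_shape (a p : Nat) (hp : p ≤ 1) : (2 * a + p).testBit 0 = decide (p = 1) := by
  rw [Nat.testBit_zero]
  rcases Nat.le_one_iff_eq_zero_or_eq_one.mp hp with h | h <;> subst h <;> simp <;> omega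

lemma tb_succ_shape (a p j : Nat) (hp : p ≤ 1) : (2 * a + p).testBit (j + 1) = a.testBit j := by
  rw [Nat.testBit_add_one, show (2 * a + p) / 2 = a by omega]

lemma nonadj_half {n : Nat} (h : Nonadj n) : Nonadj (n / 2) := by
  intro i
  simp only [Nat.testBit_div_two]
  exact h (i + 1)

lemma nonadj_two_mul {u : Nat} (h : Nonadj u) : Nonadj (2 * u) := by
  intro i
  cases i with
  | zero =>
    rw [show 2 * u = 2 * u + 0 by omega, tb_zero_shape _ _ (by omega)]
    simp
  | succ i =>
    rw [show 2 * u = 2 * u + 0 by omega, tb_succ_shape _ _ _ (by omega),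
      tb_succ_shape _ _ _ (by omega)]
    exact h i

lemma nonadj_two_mul_add_one {u : Nat} (h : Nonadj u) (he : u % 2 = 0) :
    Nonadj (2 * u + 1) := by
  intro i
  cases i with
  | zero =>
    intro ⟨_, h1⟩
    rw [tb_succ_shape _ _ _ (by omega), Nat.testBit_zero] at h1
    rw [decide_eq_true_eq] at h1
    omega
  | succ i =>
    rw [tb_succ_shape _ _ _ (by omega), tb_succ_shape _ _ _ (by omega)]
    exact h i

lemma nonadj_one : Nonadj 1 := by
  intro i
  intro ⟨_, h2⟩
  rw [Nat.testBit_add_one, Nat.div_eq_of_lt (by omega)] at h2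
  rw [Nat.zero_testBit] at h2
  exact Bool.false_ne_true h2

-- ---------- nonadjacency of the xor patterns (carry chain, mutual recurrences) ----------

def fN (n : Nat) : Nat := (n / 2) ^^^ (n + n / 2)
def gN (n : Nat) : Nat := (n / 2) ^^^ (n + n / 2 + 1)

lemma double_bits {X Y : Nat} (h0 : X % 2 = 0) (hh : X / 2 = Y) : X = 2 * Y := by omega
lemma double_bits1 {X Y : Nat} (h0 : X % 2 = 1) (hh : X / 2 = Y) : X = 2 * Y + 1 := by omega

lemma xor_mod_two (a b : Nat) : (a ^^^ b) % 2 = (a % 2 + b % 2) % 2 := by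
  rw [mod_two_of_testBit (a ^^^ b), Nat.testBit_xor]
  rw [mod_two_of_testBit a, mod_two_of_testBit b]
  cases ha : a.testBit 0 <;> cases hb : b.testBit 0 <;> simp

lemma fN_even (a : Nat) : fN (2 * a) = 2 * fN a := by
  apply double_bits
  · rw [fN, xor_mod_two]; omega
  · rw [fN, fN, Nat.xor_div_two]
    congr 1 <;> omega

lemma fN_odd_e (a : Nat) (he : a % 2 = 0) : fN (2 * a + 1) = 2 * fN a + 1 := by
  apply double_bits1
  · rw [fN, xor_mod_two]; omega
  · rw [fN, fN, Nat.xor_div_two]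
    congr 1 <;> omega

lemma fN_odd_o (a : Nat) (ho : a % 2 = 1) : fN (2 * a + 1) = 2 * gN a + 1 := by
  apply double_bits1
  · rw [fN, xor_mod_two]; omega
  · rw [fN, gN, Nat.xor_div_two]
    congr 1 <;> omega

lemma gN_even_e (a : Nat) (he : a % 2 = 0) : gN (2 * a) = 2 * fN a + 1 := by
  apply double_bits1
  · rw [gN, xor_mod_two]; omega
  · rw [gN, fN, Nat.xor_div_two]
    congr 1 <;> omega

lemma gN_even_o (a : Nat) (ho : a % 2 = 1) : gN (2 * a) = 2 * gN a + 1 := by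
  apply double_bits1
  · rw [gN, xor_mod_two]; omega
  · rw [gN, gN, Nat.xor_div_two]
    congr 1 <;> omega

lemma gN_odd (a : Nat) : gN (2 * a + 1) = 2 * gN a := by
  apply double_bits
  · rw [gN, xor_mod_two]; omega
  · rw [gN, gN, Nat.xor_div_two]
    congr 1 <;> omega

lemma fN_parity_even (a : Nat) (he : a % 2 = 0) : fN a % 2 = 0 := by
  rw [fN, xor_mod_two]; omega

lemma gN_parity_odd (a : Nat) (ho : a % 2 = 1) : gN a % 2 = 0 := by
  rw [gN, xor_mod_two]; omega

lemma fg_nonadj : ∀ n : Nat, Nonadj (fN n) ∧ Nonadj (gN n) := by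
  intro n
  induction n using Nat.strong_induction_on with
  | _ n ih =>
    by_cases h0 : n = 0
    · subst h0
      constructor
      · intro i; simp [fN, Nat.zero_testBit]
      · have : gN 0 = 1 := by rw [gN]; norm_num
        rw [this]
        exact nonadj_one
    · have hlt : n / 2 < n := Nat.div_lt_self (Nat.pos_of_ne_zero h0) (by omega)
      obtain ⟨hfa, hga⟩ := ih (n / 2) hlt
      by_cases hp : n % 2 = 0
      · -- n = 2a
        have hn : n = 2 * (n / 2) := by omega
        constructor
        · rw [hn, fN_even]; exact nonadj_two_mul hfa
        · by_cases hap : (n / 2) % 2 = 0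
          · rw [hn, gN_even_e _ hap]
            exact nonadj_two_mul_add_one hfa (fN_parity_even _ hap)
          · rw [hn, gN_even_o _ (by omega)]
            exact nonadj_two_mul_add_one hga (gN_parity_odd _ (by omega))
      · -- n = 2a + 1
        have hn : n = 2 * (n / 2) + 1 := by omega
        constructor
        · by_cases hap : (n / 2) % 2 = 0
          · rw [hn, fN_odd_e _ hap]
            exact nonadj_two_mul_add_one hfa (fN_parity_even _ hap)
          · rw [hn, fN_odd_o _ (by omega)]
            exact nonadj_two_mul_add_one hga (gN_parity_odd _ (by omega))
        · rw [hn, gN_odd]; exact nonadj_two_mul hga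

-- ---------- disjoint-split arithmetic ----------

lemma ldiff_div_two (u k : Nat) : (Nat.ldiff u k) / 2 = Nat.ldiff (u / 2) (k / 2) := by
  apply Nat.eq_of_testBit_eq
  intro i
  simp [Nat.testBit_div_two, Nat.testBit_ldiff]

lemma and_add_ldiff (u k : Nat) : (u &&& k) + Nat.ldiff u k = u := by
  induction u using Nat.strong_induction_on generalizing k with
  | _ u ih =>
    by_cases h0 : u = 0
    · subst h0
      have h1 : (0 &&& k) = 0 := by
        apply Nat.eq_of_testBit_eq; intro i; simp [Nat.testBit_and, Nat.zero_testBit]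
      have h2 : Nat.ldiff 0 k = 0 := by
        apply Nat.eq_of_testBit_eq; intro i; simp [Nat.testBit_ldiff, Nat.zero_testBit]
      simp [h1, h2]
    · have hlt : u / 2 < u := Nat.div_lt_self (Nat.pos_of_ne_zero h0) (by omega)
      have ihh := ih (u / 2) hlt (k / 2)
      have hand : (u &&& k) / 2 = (u / 2) &&& (k / 2) := Nat.and_div_two
      have hld : (Nat.ldiff u k) / 2 = Nat.ldiff (u / 2) (k / 2) := ldiff_div_two u k
      have hm1 : (u &&& k) % 2 + (Nat.ldiff u k) % 2 = u % 2 := by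
        rw [mod_two_of_testBit (u &&& k), mod_two_of_testBit (Nat.ldiff u k),
          mod_two_of_testBit u, Nat.testBit_and, Nat.testBit_ldiff]
        cases hu : u.testBit 0 <;> cases hk : k.testBit 0 <;> simp
      omega

lemma ldiff_eq_sub_and (u k : Nat) : Nat.ldiff u k = u - (u &&& k) := by
  have := and_add_ldiff u k; omega

-- ---------- signed-digit value recursion gp/gm and its properties ----------

def gp (x : Int) : Nat :=
  if _h : x = 0 then 0
  else if x % 2 = 0 then 2 * gp (x / 2)
  else if x % 4 = 1 then 2 * gp ((x - 1) / 2) + 1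
  else 2 * gp ((x + 1) / 2)
  termination_by x.natAbs
  decreasing_by all_goals omega

def gm (x : Int) : Nat :=
  if _h : x = 0 then 0
  else if x % 2 = 0 then 2 * gm (x / 2)
  else if x % 4 = 1 then 2 * gm ((x - 1) / 2)
  else 2 * gm ((x + 1) / 2) + 1
  termination_by x.natAbs
  decreasing_by all_goals omega

lemma gp_even (x : Int) (h0 : x ≠ 0) (hp : x % 2 = 0) : gp x = 2 * gp (x / 2) := by
  rw [gp]; simp [h0, hp]

lemma gm_even (x : Int) (h0 : x ≠ 0) (hp : x % 2 = 0) : gm x = 2 * gm (x / 2) := by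
  rw [gm]; simp [h0, hp]

lemma gp_odd1 (x : Int) (h0 : x ≠ 0) (hp : ¬ x % 2 = 0) (h4 : x % 4 = 1) :
    gp x = 2 * gp ((x - 1) / 2) + 1 := by
  rw [gp]; simp [h0, hp, h4]

lemma gm_odd1 (x : Int) (h0 : x ≠ 0) (hp : ¬ x % 2 = 0) (h4 : x % 4 = 1) :
    gm x = 2 * gm ((x - 1) / 2) := by
  rw [gm]; simp [h0, hp, h4]

lemma gp_odd3 (x : Int) (h0 : x ≠ 0) (hp : ¬ x % 2 = 0) (h4 : ¬ x % 4 = 1) :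
    gp x = 2 * gp ((x + 1) / 2) := by
  rw [gp]; simp [h0, hp, h4]

lemma gm_odd3 (x : Int) (h0 : x ≠ 0) (hp : ¬ x % 2 = 0) (h4 : ¬ x % 4 = 1) :
    gm x = 2 * gm ((x + 1) / 2) + 1 := by
  rw [gm]; simp [h0, hp, h4]

lemma and_two_mul (a b p q : Nat) (hp : p ≤ 1) (hq : q ≤ 1) (h : p = 0 ∨ q = 0) :
    (2 * a + p) &&& (2 * b + q) = 2 * (a &&& b) := by
  apply Nat.eq_of_testBit_eq
  intro i
  cases i with
  | zero =>
    rw [Nat.testBit_and, tb_zero_shape _ _ hp, tb_zero_shape _ _ hq,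
      show 2 * (a &&& b) = 2 * (a &&& b) + 0 by omega, tb_zero_shape _ _ (by omega)]
    rcases h with h | h <;> subst h <;> simp
  | succ i =>
    rw [Nat.testBit_and, tb_succ_shape _ _ _ hp, tb_succ_shape _ _ _ hq,
      show 2 * (a &&& b) = 2 * (a &&& b) + 0 by omega, tb_succ_shape _ _ _ (by omega),
      Nat.testBit_and]

lemma or_two_mul (a b p q : Nat) (hp : p ≤ 1) (hq : q ≤ 1) :
    (2 * a + p) ||| (2 * b + q) = 2 * (a ||| b) + (p ||| q) := by
  have hpq : (p ||| q) ≤ 1 := by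
    interval_cases p <;> interval_cases q <;> decide
  apply Nat.eq_of_testBit_eq
  intro i
  cases i with
  | zero =>
    rw [Nat.testBit_or, tb_zero_shape _ _ hp, tb_zero_shape _ _ hq,
      tb_zero_shape _ _ hpq]
    interval_cases p <;> interval_cases q <;> simp
  | succ i =>
    rw [Nat.testBit_or, tb_succ_shape _ _ _ hp, tb_succ_shape _ _ _ hq,
      tb_succ_shape _ _ _ hpq, Nat.testBit_or]

lemma gp_gm_props : ∀ x : Int,
    (gp x : Int) - gm x = x ∧ (gp x &&& gm x) = 0 ∧ Nonadj (gp x ||| gm x) ∧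
    (x % 2 = 0 → gp x % 2 = 0 ∧ gm x % 2 = 0) := by
  intro x
  induction hni : x.natAbs using Nat.strong_induction_on generalizing x with
  | _ n ih =>
    subst hni
    by_cases h0 : x = 0
    · subst h0
      refine ⟨by simp [gp, gm], by simp [gp, gm], ?_, by simp [gp, gm]⟩
      intro i; simp [gp, gm, Nat.zero_testBit]
    · by_cases hp : x % 2 = 0
      · have hy : (x / 2).natAbs < x.natAbs := by omega
        obtain ⟨hv, hd, hn, hpar⟩ := ih _ hy (x / 2) rfl
        rw [gp, gm]
        simp only [h0, dite_false, hp, if_true]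
        refine ⟨by push_cast; omega, ?_, ?_, by omega⟩
        · rw [show 2 * gp (x/2) = 2 * gp (x/2) + 0 by omega,
            show 2 * gm (x/2) = 2 * gm (x/2) + 0 by omega,
            and_two_mul _ _ _ _ (by omega) (by omega) (by omega), hd]
        · rw [show 2 * gp (x/2) = 2 * gp (x/2) + 0 by omega,
            show 2 * gm (x/2) = 2 * gm (x/2) + 0 by omega,
            or_two_mul _ _ _ _ (by omega) (by omega)]
          simpa using nonadj_two_mul hn
      · by_cases h4 : x % 4 = 1
        · have hy : ((x - 1) / 2).natAbs < x.natAbs := by omega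
          obtain ⟨hv, hd, hn, hpar⟩ := ih _ hy ((x - 1) / 2) rfl
          have hye : ((x - 1) / 2) % 2 = 0 := by omega
          obtain ⟨hpe, hme⟩ := hpar hye
          rw [gp, gm]
          simp only [h0, dite_false, hp, if_false, h4, if_true]
          refine ⟨by push_cast; omega, ?_, ?_, fun h => h.elim⟩
          · rw [show 2 * gm ((x-1)/2) = 2 * gm ((x-1)/2) + 0 by omega,
              and_two_mul _ _ _ _ (by omega) (by omega) (by omega), hd]
          · rw [show 2 * gm ((x-1)/2) = 2 * gm ((x-1)/2) + 0 by omega,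
              or_two_mul _ _ _ _ (by omega) (by omega)]
            apply nonadj_two_mul_add_one hn
            rw [mod_two_of_testBit, Nat.testBit_or]
            rw [mod_two_of_testBit] at hpe hme
            cases h5 : (gp ((x-1)/2)).testBit 0 <;> rw [h5] at hpe <;>
              cases h6 : (gm ((x-1)/2)).testBit 0 <;> rw [h6] at hme <;> simp at hpe hme ⊢
        · have h43 : x % 4 = 3 := by omega
          have hy : ((x + 1) / 2).natAbs < x.natAbs := by omega
          obtain ⟨hv, hd, hn, hpar⟩ := ih _ hy ((x + 1) / 2) rfl
          have hye : ((x + 1) / 2) % 2 = 0 := by omega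
          obtain ⟨hpe, hme⟩ := hpar hye
          rw [gp, gm]
          simp only [h0, dite_false, hp, if_false, h4, if_false]
          refine ⟨by push_cast; omega, ?_, ?_, fun h => h.elim⟩
          · rw [show 2 * gp ((x+1)/2) = 2 * gp ((x+1)/2) + 0 by omega,
              and_two_mul _ _ _ _ (by omega) (by omega) (by omega), hd]
          · rw [show 2 * gp ((x+1)/2) = 2 * gp ((x+1)/2) + 0 by omega,
              or_two_mul _ _ _ _ (by omega) (by omega)]
            have : (0 ||| 1 : Nat) = 1 := by decide
            rw [this]
            apply nonadj_two_mul_add_one hn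
            rw [mod_two_of_testBit, Nat.testBit_or]
            rw [mod_two_of_testBit] at hpe hme
            cases h5 : (gp ((x+1)/2)).testBit 0 <;> rw [h5] at hpe <;>
              cases h6 : (gm ((x+1)/2)).testBit 0 <;> rw [h6] at hme <;> simp at hpe hme ⊢

-- ---------- uniqueness of nonadjacent signed-digit representations ----------

lemma and_half {p m : Nat} (h : p &&& m = 0) : (p / 2) &&& (m / 2) = 0 := by
  rw [← Nat.and_div_two, h]

lemma and_bit0 {p m : Nat} (h : p &&& m = 0) : ¬(p % 2 = 1 ∧ m % 2 = 1) := by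
  intro ⟨hp, hm⟩
  have h1 : (p &&& m).testBit 0 = false := by rw [h]; exact Nat.zero_testBit 0
  rw [Nat.testBit_and, Nat.testBit_zero, Nat.testBit_zero, hp, hm] at h1
  simp at h1

lemma or_bit1_zero {p m : Nat} (hn : Nonadj (p ||| m)) (hodd : p % 2 = 1 ∨ m % 2 = 1) :
    (p / 2) % 2 = 0 ∧ (m / 2) % 2 = 0 := by
  have h0 : (p ||| m).testBit 0 = true := by
    rw [Nat.testBit_or, Nat.testBit_zero, Nat.testBit_zero]
    rcases hodd with h | h <;> rw [h] <;> simp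
  have h1 : (p ||| m).testBit 1 = false := by
    cases hcc : (p ||| m).testBit 1
    · rfl
    · exact absurd ⟨h0, hcc⟩ (hn 0)
  rw [testBit_one_div, Nat.or_div_two, Nat.testBit_or, Nat.testBit_zero, Nat.testBit_zero] at h1
  rw [Bool.or_eq_false_iff, decide_eq_false_iff_not, decide_eq_false_iff_not] at h1
  omega

lemma naf_unique : ∀ (N p m p' m' : Nat), p + m + p' + m' ≤ N →
    p &&& m = 0 → p' &&& m' = 0 → Nonadj (p ||| m) → Nonadj (p' ||| m') →
    (p : Int) - m = (p' : Int) - m' → p = p' ∧ m = m' := by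
  intro N
  induction N with
  | zero => intro p m p' m' hN _ _ _ _ _; omega
  | succ N ih =>
    intro p m p' m' hN hd hd' hn hn' hv
    by_cases hz : p + m + p' + m' = 0
    · omega
    · have hrec := ih (p / 2) (m / 2) (p' / 2) (m' / 2) (by omega)
        (and_half hd) (and_half hd')
        (by rw [← Nat.or_div_two]; exact nonadj_half hn)
        (by rw [← Nat.or_div_two]; exact nonadj_half hn')
      have hb := and_bit0 hd
      have hb' := and_bit0 hd'
      by_cases hpp : p % 2 = 0
      · by_cases hmm : m % 2 = 0
        · -- value even, so p' m' both even too
          have hpe' : p' % 2 = 0 ∧ m' % 2 = 0 := by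
            rcases Nat.mod_two_eq_zero_or_one p' with h | h <;>
              rcases Nat.mod_two_eq_zero_or_one m' with h2 | h2
            · exact ⟨h, h2⟩
            · exfalso; omega
            · exfalso; omega
            · exact absurd ⟨h, h2⟩ hb'
          obtain ⟨hq, hq2⟩ := hrec (by push_cast; omega)
          omega
        · -- m odd: v ≡ 3 mod 4 on both sides
          have hm1 : m % 2 = 1 := by omega
          obtain ⟨hpb, hmb⟩ := or_bit1_zero hn (Or.inr hm1)
          -- p even and p/2 even → p % 4 = 0 ; m % 4 = 1
          have hside' : m' % 2 = 1 ∧ p' % 2 = 0 := by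
            rcases Nat.mod_two_eq_zero_or_one p' with h | h
            · rcases Nat.mod_two_eq_zero_or_one m' with h2 | h2
              · exfalso; omega
              · exact ⟨h2, h⟩
            · have h2 : m' % 2 = 0 := by omega
              obtain ⟨hpb', hmb'⟩ := or_bit1_zero hn' (Or.inl h)
              exfalso; omega
          obtain ⟨hm1', hp0'⟩ := hside'
          obtain ⟨hpb', hmb'⟩ := or_bit1_zero hn' (Or.inr hm1')
          obtain ⟨hq, hq2⟩ := hrec (by push_cast; omega)
          omega
      · have hp1 : p % 2 = 1 := by omega
        have hm0 : m % 2 = 0 := by omega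
        obtain ⟨hpb, hmb⟩ := or_bit1_zero hn (Or.inl hp1)
        have hside' : p' % 2 = 1 ∧ m' % 2 = 0 := by
          rcases Nat.mod_two_eq_zero_or_one p' with h | h
          · rcases Nat.mod_two_eq_zero_or_one m' with h2 | h2
            · exfalso; omega
            · obtain ⟨hpb', hmb'⟩ := or_bit1_zero hn' (Or.inr h2)
              exfalso; omega
          · exact ⟨h, by omega⟩
        obtain ⟨hp1', hm0'⟩ := hside'
        obtain ⟨hpb', hmb'⟩ := or_bit1_zero hn' (Or.inl hp1')
        obtain ⟨hq, hq2⟩ := hrec (by push_cast; omega)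
        omega

-- ---------- the bit-trick values satisfy the same three properties ----------

lemma band_natCast_negSucc (u k : Nat) :
    PySem.Int.band ((u : Int)) (Int.negSucc k) = ((u - (u &&& k) : Nat) : Int) := by
  have ha : (0 : Int) ≤ (u : Int) := by omega
  have hb : ¬ (0 : Int) ≤ Int.negSucc k := not_le.mpr (Int.negSucc_lt_zero k)
  unfold PySem.Int.band
  rw [if_pos ha, if_neg hb, toNat_neg_negSucc, Int.toNat_natCast]

lemma bxor_negSucc_negSucc (a b : Nat) :
    PySem.Int.bxor (Int.negSucc a) (Int.negSucc b) = ((a ^^^ b : Nat) : Int) := by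
  have ha : ¬ (0 : Int) ≤ Int.negSucc a := not_le.mpr (Int.negSucc_lt_zero a)
  have hb : ¬ (0 : Int) ≤ Int.negSucc b := not_le.mpr (Int.negSucc_lt_zero b)
  unfold PySem.Int.bxor
  rw [if_neg ha, if_neg hb, toNat_neg_negSucc, toNat_neg_negSucc]

-- positive case: ldiff x3 c = ldiff xh c when c = xh ^^^ x3
lemma ldiff_xor_right (a b : Nat) : Nat.ldiff a (a ^^^ b) = Nat.ldiff b (a ^^^ b) := by
  apply Nat.eq_of_testBit_eq
  intro i
  simp only [Nat.testBit_ldiff, Nat.testBit_xor]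
  cases a.testBit i <;> cases b.testBit i <;> simp

lemma trick_props (x : Int) :
    ∃ p m : Nat,
      PySem.Int.band (x + (x >>> (1:Nat))) (PySem.Int.bxor (x >>> (1:Nat)) (x + (x >>> (1:Nat)))) = (p : Int) ∧
      PySem.Int.band (x >>> (1:Nat)) (PySem.Int.bxor (x >>> (1:Nat)) (x + (x >>> (1:Nat)))) = (m : Int) ∧
      (p : Int) - m = x ∧ (p &&& m) = 0 ∧ Nonadj (p ||| m) := by
  cases x with
  | ofNat n =>
    have h1 : (Int.ofNat n) >>> (1 : Nat) = ((n / 2 : Nat) : Int) := by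
      show ((n >>> 1 : Nat) : Int) = _
      norm_num [Nat.shiftRight_one]
    have h2 : (Int.ofNat n) = ((n : Nat) : Int) := rfl
    rw [h1, h2]
    have h3 : ((n : Nat) : Int) + ((n / 2 : Nat) : Int) = (((n + n / 2 : Nat)) : Int) := by push_cast; ring
    rw [h3, PySem.Int.bxor_natCast, PySem.Int.band_natCast, PySem.Int.band_natCast]
    refine ⟨_, _, rfl, rfl, ?_, ?_, ?_⟩
    · -- value
      have hsplit1 := and_add_ldiff (n + n / 2) ((n / 2) ^^^ (n + n / 2))
      have hsplit2 := and_add_ldiff (n / 2) ((n / 2) ^^^ (n + n / 2))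
      have heq : Nat.ldiff (n + n / 2) ((n / 2) ^^^ (n + n / 2))
          = Nat.ldiff (n / 2) ((n / 2) ^^^ (n + n / 2)) := (ldiff_xor_right _ _).symm
      push_cast
      omega
    · apply Nat.eq_of_testBit_eq
      intro i
      simp only [Nat.testBit_and, Nat.testBit_xor, Nat.zero_testBit]
      cases (n + n / 2).testBit i <;> cases (n / 2).testBit i <;> simp
    · have hor : ((n + n / 2) &&& ((n / 2) ^^^ (n + n / 2))) ||| ((n / 2) &&& ((n / 2) ^^^ (n + n / 2)))
          = (n / 2) ^^^ (n + n / 2) := by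
        apply Nat.eq_of_testBit_eq
        intro i
        simp only [Nat.testBit_or, Nat.testBit_and, Nat.testBit_xor]
        cases (n + n / 2).testBit i <;> cases (n / 2).testBit i <;> simp
      rw [hor]
      exact (fg_nonadj n).1
  | negSucc n =>
    have h1 : (Int.negSucc n) >>> (1 : Nat) = Int.negSucc (n / 2) := rfl
    rw [h1, Int.negSucc_add_negSucc]
    set a := n / 2 with ha
    set s := (n + a).succ with hs
    rw [bxor_negSucc_negSucc]
    rw [PySem.Int.band_comm (Int.negSucc s), PySem.Int.band_comm (Int.negSucc a),
      band_natCast_negSucc, band_natCast_negSucc]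
    refine ⟨_, _, rfl, rfl, ?_, ?_, ?_⟩
    · -- value: (c - (c&&&s)) - (c - (c&&&a)) = -(n+1) where c = a ^^^ s
      have hsub1 := ldiff_eq_sub_and (a ^^^ s) s
      have hsub2 := ldiff_eq_sub_and (a ^^^ s) a
      have hle1 : ((a ^^^ s) &&& s) ≤ (a ^^^ s) := by
        have := and_add_ldiff (a ^^^ s) s; omega
      have hle2 : ((a ^^^ s) &&& a) ≤ (a ^^^ s) := by
        have := and_add_ldiff (a ^^^ s) a; omega
      -- relate via splits of a and s against c
      have hA := and_add_ldiff a (a ^^^ s)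
      have hS := and_add_ldiff s (a ^^^ s)
      have hEq : Nat.ldiff a (a ^^^ s) = Nat.ldiff s (a ^^^ s) := ldiff_xor_right a s
      have hca : (a ^^^ s) &&& a = a &&& (a ^^^ s) := Nat.and_comm _ _
      have hcs : (a ^^^ s) &&& s = s &&& (a ^^^ s) := Nat.and_comm _ _
      have hsn : s = n + a + 1 := by omega
      rw [Int.negSucc_eq]
      push_cast
      omega
    · apply Nat.eq_of_testBit_eq
      intro i
      rw [← ldiff_eq_sub_and, ← ldiff_eq_sub_and]
      simp only [Nat.testBit_and, Nat.testBit_ldiff, Nat.testBit_xor, Nat.zero_testBit]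
      cases a.testBit i <;> cases s.testBit i <;> simp
    · have hor : ((a ^^^ s) - ((a ^^^ s) &&& s)) ||| ((a ^^^ s) - ((a ^^^ s) &&& a))
          = a ^^^ s := by
        rw [← ldiff_eq_sub_and, ← ldiff_eq_sub_and]
        apply Nat.eq_of_testBit_eq
        intro i
        simp only [Nat.testBit_or, Nat.testBit_ldiff, Nat.testBit_xor]
        cases a.testBit i <;> cases s.testBit i <;> simp
      rw [hor]
      have hsn : s = n + a + 1 := by omega
      have : a ^^^ s = gN n := by rw [gN, hsn, ha]
      rw [this]
      exact (fg_nonadj n).2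
  
-- combine: the trick masks ARE gp/gm
lemma trick_eq_greedy (x : Int) :
    PySem.Int.band (x + (x >>> (1:Nat))) (PySem.Int.bxor (x >>> (1:Nat)) (x + (x >>> (1:Nat)))) = ((gp x : Nat) : Int) ∧
    PySem.Int.band (x >>> (1:Nat)) (PySem.Int.bxor (x >>> (1:Nat)) (x + (x >>> (1:Nat)))) = ((gm x : Nat) : Int) := by
  obtain ⟨p, m, hp, hm, hv, hd, hn⟩ := trick_props x
  obtain ⟨hv', hd', hn', _⟩ := gp_gm_props x
  obtain ⟨h1, h2⟩ := naf_unique (p + m + gp x + gm x) p m (gp x) (gm x) (by omega)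
    hd hd' hn hn' (by omega)
  rw [hp, hm, h1, h2]
  exact ⟨rfl, rfl⟩

-- ---------- B-side: the recoding loop produces the bit indices of gp/gm ----------

-- |x| strictly decreases along each branch of the recoding loop
lemma pvNafDecEven (x : Int) (h0 : ¬ x = 0) (he : ¬ PySem.Int.mod x 2 ≠ 0) :
    ((x >>> (1 : Nat)).natAbs) < x.natAbs := by
  rw [Int.shiftRight_eq_div_pow, PySem.Int.mod_eq_emod_of_pos (by omega : (0:Int) < 2)] at *
  omega

lemma pvNafDecOdd1 (x : Int) (h0 : ¬ x = 0) (ho : PySem.Int.mod x 2 ≠ 0)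
    (hd : 2 - PySem.Int.mod x 4 = 1) :
    (((x - (2 - PySem.Int.mod x 4)) >>> (1 : Nat)).natAbs) < x.natAbs := by
  rw [Int.shiftRight_eq_div_pow] at *
  rw [PySem.Int.mod_eq_emod_of_pos (by omega : (0:Int) < 2)] at ho
  rw [PySem.Int.mod_eq_emod_of_pos (by omega : (0:Int) < 4)] at *
  omega

lemma pvNafDecOdd3 (x : Int) (h0 : ¬ x = 0) (ho : PySem.Int.mod x 2 ≠ 0)
    (hd : ¬ 2 - PySem.Int.mod x 4 = 1) :
    (((x - (2 - PySem.Int.mod x 4)) >>> (1 : Nat)).natAbs) < x.natAbs := by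
  rw [Int.shiftRight_eq_div_pow] at *
  rw [PySem.Int.mod_eq_emod_of_pos (by omega : (0:Int) < 2)] at ho
  rw [PySem.Int.mod_eq_emod_of_pos (by omega : (0:Int) < 4)] at *
  omega

lemma nafLoop_eq (f : Nat) : ∀ (x : Int) (i : Int) (pos neg : List Int), x.natAbs < f →
    nafLoop f x i pos neg
      = (pos ++ (gp x).bitIndices.map (fun (b : Nat) => i + (b : Int)),
         neg ++ (gm x).bitIndices.map (fun (b : Nat) => i + (b : Int))) := by
  induction f with
  | zero => intro x i pos neg hf; omega
  | succ f ih =>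
    intro x i pos neg hf
    by_cases h0 : x = 0
    · subst h0
      simp [nafLoop, gp, gm]
    · have hmod2 : PySem.Int.mod x 2 = x % 2 := PySem.Int.mod_eq_emod_of_pos (by omega)
      have hmod4 : PySem.Int.mod x 4 = x % 4 := PySem.Int.mod_eq_emod_of_pos (by omega)
      have hsh : ∀ y : Int, y >>> (1 : Nat) = y / 2 := by
        intro y
        rw [Int.shiftRight_eq_div_pow]; norm_num
      have hmapshift : ∀ (P : Nat),
          (P.bitIndices.map (fun (b : Nat) => b + 1)).map (fun (b : Nat) => i + (b : Int))
            = P.bitIndices.map (fun (b : Nat) => (i + 1) + (b : Int)) := by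
        intro P
        rw [List.map_map]
        apply List.map_congr_left
        intro b _
        simp only [Function.comp_apply]
        push_cast
        ring
      by_cases hp : x % 2 = 0
      · have hne : ¬ (PySem.Int.mod x 2 ≠ 0) := by rw [hmod2]; omega
        have hdec := pvNafDecEven x h0 hne
        rw [nafLoop, if_neg h0, if_neg hne, ih _ _ _ _ (by omega), hsh]
        rw [hsh] at *
        rw [gp_even x h0 hp, gm_even x h0 hp]
        rw [Nat.bitIndices_two_mul, Nat.bitIndices_two_mul, hmapshift, hmapshift]
      · have hyes : (PySem.Int.mod x 2 ≠ 0) := by rw [hmod2]; omega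
        by_cases h4 : x % 4 = 1
        · have hd1 : (2 : Int) - PySem.Int.mod x 4 = 1 := by rw [hmod4]; omega
          have hdec := pvNafDecOdd1 x h0 hyes hd1
          rw [nafLoop, if_neg h0, if_pos hyes]
          simp only [hd1]
          rw [hd1, hsh] at hdec
          rw [if_pos trivial, hsh, ih _ _ _ _ (by omega)]
          rw [show x - 1 = x - (2 - x % 4) by omega] at *
          rw [gp_odd1 x h0 hp h4, gm_odd1 x h0 hp h4]
          rw [show x - (2 - x % 4) = x - 1 by omega] at *
          rw [Nat.bitIndices_two_mul_add_one, Nat.bitIndices_two_mul]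
          simp only [List.map_cons, Nat.cast_zero, add_zero, List.append_assoc,
            List.cons_append, List.nil_append]
          rw [hmapshift, hmapshift]
        · have h43 : x % 4 = 3 := by omega
          have hd1 : (2 : Int) - PySem.Int.mod x 4 = -1 := by rw [hmod4]; omega
          have hdn : ¬ (2 : Int) - PySem.Int.mod x 4 = 1 := by omega
          have hdec := pvNafDecOdd3 x h0 hyes hdn
          rw [nafLoop, if_neg h0, if_pos hyes]
          simp only [hd1]
          rw [hd1, hsh] at hdec
          rw [if_neg (by simp), hsh,
            show x - (-1) = x + 1 by ring,
            ih _ _ _ _ (by rw [show x - (-1) = x + 1 by ring] at hdec; omega)]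
          rw [gp_odd3 x h0 hp h4, gm_odd3 x h0 hp h4]
          rw [Nat.bitIndices_two_mul, Nat.bitIndices_two_mul_add_one]
          simp only [List.map_cons, Nat.cast_zero, add_zero, List.append_assoc,
            List.cons_append, List.nil_append]
          rw [hmapshift, hmapshift]

-- ---------- bitIndices = ascending filter over range bitLength ----------

lemma bitIndices_filter (p : Nat) :
    p.bitIndices = (List.range (PySem.Int.bitLength (p : Int))).filter (fun i => p.testBit i) := by
  induction p using Nat.strong_induction_on with
  | _ p ih
  =>
    by_cases h0 : p = 0
    · subst h0
      simp [PySem.Int.bitLength_zero]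
    · have hlt : p / 2 < p := Nat.div_lt_self (Nat.pos_of_ne_zero h0) (by omega)
      rw [PySem.Int.bitLength_natCast (Nat.pos_of_ne_zero h0), List.range_succ_eq_map,
        List.filter_cons]
      have htail : List.filter (fun i => p.testBit i) (List.map (fun i => i + 1) (List.range (PySem.Int.bitLength ((p / 2 : Nat) : Int))))
          = List.map (fun i => i + 1) ((List.range (PySem.Int.bitLength ((p / 2 : Nat) : Int))).filter (fun i => (p / 2).testBit i)) := by
        rw [List.filter_map]
        congr 1
        apply List.filter_congr
        intro i _
        simp [Function.comp, Nat.testBit_add_one]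
      by_cases hp : p % 2 = 0
      · have hb0 : p.testBit 0 = false := by
          rw [Nat.testBit_zero, decide_eq_false_iff_not]; omega
        rw [hb0]
        simp only [Bool.false_eq_true, if_false]
        rw [htail, ← ih _ hlt]
        have hpe : p = 2 * (p / 2) := by omega
        rw [hpe, Nat.bitIndices_two_mul]
        rw [Nat.mul_div_cancel_left _ (by omega : 0 < 2)]
      · have hb0 : p.testBit 0 = true := by
          rw [Nat.testBit_zero, decide_eq_true_eq]; omega
        rw [hb0]
        simp only [if_true]
        rw [htail, ← ih _ hlt]
        have hpe : p = 2 * (p / 2) + 1 := by omega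
        conv_lhs => rw [hpe]
        rw [Nat.bitIndices_two_mul_add_one]

-- ---------- final assembly ----------

lemma filter_map_cast (q : Int → Bool) (L : List Nat) :
    (L.map (fun (b : Nat) => (b : Int))).filter q
      = (L.filter (fun (i : Nat) => q ((i : Nat) : Int))).map (fun (i : Nat) => (i : Int)) := by
  induction L with
  | nil => rfl
  | cons a t ih =>
    simp only [List.map_cons, List.filter_cons]
    cases h : q ((a : Nat) : Int) <;> simp [h, ih]

lemma ports_agree (steps poly_degree : Int) :
    get_glk_col steps poly_degree = get_glk_col_alt steps poly_degree := by
  obtain ⟨hp, hm⟩ := trick_eq_greedy steps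
  rw [get_glk_col, get_glk_col_alt]
  simp only [hp, hm]
  rw [nafLoop_eq (steps.natAbs + 1) steps 0 [] [] (by omega)]
  simp only [List.nil_append]
  rw [pos_side, neg_side]
  have hmap0 : ∀ (l : List Nat), l.map (fun (b : Nat) => (0 : Int) + (b : Int)) = l.map (fun (b : Nat) => (b : Int)) := by
    intro l; apply List.map_congr_left; intro b _; ring
  rw [hmap0, hmap0]
  rw [Prod.mk.injEq]
  constructor
  · rw [bitIndices_filter, ← List.map_reverse, filter_map_cast, ← List.filter_reverse,
      List.filter_filter]
    congr 1
    apply List.filter_congr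
    intro i _
    simp only [Int.toNat_natCast]
    cases h1 : (gp steps).testBit i <;>
      cases h2 : decide (PySem.Int.band ((poly_degree >>> (1:Nat) - 1) >>> i) 1 ≠ 0) <;>
      simp_all
  · rw [bitIndices_filter, ← List.map_reverse, List.filter_reverse]

-- ===== VERDICT (by name: the statement is the Claim_ definition above) =====
theorem get_glk_col_spec : Claim_equal_get_glk_col := by
  intro steps poly_degree _
  unfold Spec_get_glk_col
  exact ports_agree steps poly_degree
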